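-- pv_equiv track=rewrite | github.com/TaNiShK1911/DesignAThon | services/pilot_briefing_service.py | parse_route_input
-- ===== SOURCE A (Python) =====
-- def parse_route_input(route_input):
--     items = route_input.split(',')
--     route = []
--     for i in range(0, len(items), 2):
--         icao = items[i].strip().upper()
--         altitude = items[i+1].strip() if i+1 < len(items) else "Unknown"
--         route.append((icao, altitude))
--     return route
-- ===== SOURCE B (Python) =====
-- def parse_route_input(route_input):
--     items = route_input.split(',')
--     icaos = items[0::2]
--     alts = [a.strip() for a in items[1::2]]
--     alts += ["Unknown"] * (len(icaos) - len(alts))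
--     return [(i.strip().upper(), a) for i, a in zip(icaos, alts)]
-- ===== Notes on version B (the rewrite author's own statement) =====
-- stated objective: idiomatic
-- what changed: Replaces the index-stepping loop (range(0, len, 2) with i/i+1 lookups) by slicing the split list into two interleaved streams items[0::2] and items[1::2], padding the altitude stream with 'Unknown', and zipping the two streams into pairs.
import Mathlib
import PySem

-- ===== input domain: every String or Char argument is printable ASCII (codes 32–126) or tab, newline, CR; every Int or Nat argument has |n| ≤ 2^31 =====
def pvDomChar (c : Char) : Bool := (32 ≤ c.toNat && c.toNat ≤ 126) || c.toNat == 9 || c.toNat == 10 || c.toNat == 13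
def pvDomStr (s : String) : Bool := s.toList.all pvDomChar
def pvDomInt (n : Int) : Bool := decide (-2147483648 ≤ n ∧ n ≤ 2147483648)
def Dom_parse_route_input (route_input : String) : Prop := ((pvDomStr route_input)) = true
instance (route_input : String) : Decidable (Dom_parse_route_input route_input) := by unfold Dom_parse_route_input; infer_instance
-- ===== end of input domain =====

-- B replaces A's index-stepping loop by slicing the split list into two interleaved
-- streams ([0::2] / [1::2]) that are padded and zipped; same cost, more idiomatic.

-- ===== PORT A =====
-- A: items = route_input.split(','); for i in range(0, len(items), 2): append pair
def parse_route_input (route_input : String) : List (String × String) :=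
  let items := (PySem.Str.split? route_input ",").getD []   -- sep is the literal ",", never empty, so split? is always `some`
  (PySem.List.pyRange 0 (PySem.List.len items) 2).foldl
    (fun route i =>
      let icao := PySem.Str.upper (PySem.Str.strip (PySem.List.pyGetD items i ""))
      let altitude := if i + 1 < PySem.List.len items
        then PySem.Str.strip (PySem.List.pyGetD items (i + 1) "")
        else "Unknown"
      route ++ [(icao, altitude)]) []

-- ===== PORT B =====
-- B: icaos = items[0::2]; alts = stripped items[1::2] padded with "Unknown"; zip them
def parse_route_input_alt (route_input : String) : List (String × String) :=
  let items := (PySem.Str.split? route_input ",").getD []   -- sep is the literal ",", never empty, so split? is always `some`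
  let icaos := (PySem.List.slice? items (some 0) none 2).getD []   -- step 2 ≠ 0, so slice? is always `some`
  let alts0 := ((PySem.List.slice? items (some 1) none 2).getD []).map PySem.Str.strip
  let alts := alts0 ++ List.replicate (icaos.length - alts0.length) "Unknown"
  (icaos.zip alts).map (fun p => (PySem.Str.upper (PySem.Str.strip p.1), p.2))

-- ===== PRECONDITION & SPEC =====
def Spec_parse_route_input (route_input : String) (out : List (String × String)) : Prop := out = parse_route_input_alt route_input
instance (route_input : String) (out : List (String × String)) : Decidable (Spec_parse_route_input route_input out) := by unfold Spec_parse_route_input; infer_instance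

-- ===== CLAIM (what is proved, stated in full; the proofs are below) =====
def Claim_equal_parse_route_input : Prop := ∀ (route_input : String), Dom_parse_route_input route_input → Spec_parse_route_input route_input (parse_route_input route_input)

-- ===== LEMMAS AND PROOFS =====

-- the result both programs compute from the split list, two items at a time
def pvPairs : List String → List (String × String)
  | [] => []
  | [x] => [(PySem.Str.upper (PySem.Str.strip x), "Unknown")]
  | x :: y :: r => (PySem.Str.upper (PySem.Str.strip x), PySem.Str.strip y) :: pvPairs r

def pvEvens {α : Type} : List α → List α
  | [] => []
  | [x] => [x]
  | x :: _ :: r => x :: pvEvens r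

def pvOdds {α : Type} : List α → List α
  | [] => []
  | [_] => []
  | _ :: y :: r => y :: pvOdds r

lemma pvSliceEven_formula {α : Type} (xs : List α) :
    PySem.List.slice? xs (some 0) none 2 =
      some (List.filterMap (fun k => xs[2*k]?) (List.range ((xs.length+1)/2))) := by
  simp [PySem.List.slice?, PySem.List.sliceIndices]
  have hc : (if 0 < xs.length then (((xs.length:Int) + 2 - 1) / 2).toNat else 0) = (xs.length+1)/2 := by
    split_ifs <;> omega
  rw [hc]
  apply List.filterMap_congr
  intro k _
  congr 1

lemma pvSliceOdd_formula {α : Type} (xs : List α) :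
    PySem.List.slice? xs (some 1) none 2 =
      some (List.filterMap (fun k => xs[1+2*k]?) (List.range (xs.length/2))) := by
  cases xs with
  | nil => simp [PySem.List.slice?, PySem.List.sliceIndices]
  | cons a l =>
    simp [PySem.List.slice?, PySem.List.sliceIndices]
    have hc : (if 0 < l.length then (((l.length:Int) + 2 - 1) / 2).toNat else 0) = (l.length+1)/2 := by
      split_ifs <;> omega
    rw [hc]
    apply List.filterMap_congr
    intro k _
    congr 1

lemma pvFilterMap_evens {α : Type} (xs : List α) :
    List.filterMap (fun k => xs[2*k]?) (List.range ((xs.length+1)/2)) = pvEvens xs := by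
  induction xs using pvEvens.induct with
  | case1 => simp [pvEvens]
  | case2 x => simp [pvEvens]
  | case3 x y r ih =>
    have hc : ((x :: y :: r).length + 1)/2 = (r.length+1)/2 + 1 := by simp; omega
    rw [hc, List.range_succ_eq_map, List.filterMap_cons, List.filterMap_map]
    have h0 : (x :: y :: r)[2*0]? = some x := by simp
    rw [h0]
    have hrest : List.filterMap ((fun k => (x :: y :: r)[2*k]?) ∘ Nat.succ) (List.range ((r.length+1)/2))
        = List.filterMap (fun k => r[2*k]?) (List.range ((r.length+1)/2)) := by
      apply List.filterMap_congr
      intro k _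
      show (x :: y :: r)[2*(k+1)]? = r[2*k]?
      have : 2*(k+1) = 2*k + 1 + 1 := by omega
      rw [this]
      simp
    rw [hrest, ih]
    rfl

lemma pvFilterMap_odds {α : Type} (xs : List α) :
    List.filterMap (fun k => xs[1+2*k]?) (List.range (xs.length/2)) = pvOdds xs := by
  induction xs using pvOdds.induct with
  | case1 => simp [pvOdds]
  | case2 x => simp [pvOdds]
  | case3 x y r ih =>
    have hc : (x :: y :: r).length/2 = r.length/2 + 1 := by simp; omega
    rw [hc, List.range_succ_eq_map, List.filterMap_cons, List.filterMap_map]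
    have h0 : (x :: y :: r)[1+2*0]? = some y := by simp
    rw [h0]
    have hrest : List.filterMap ((fun k => (x :: y :: r)[1+2*k]?) ∘ Nat.succ) (List.range (r.length/2))
        = List.filterMap (fun k => r[1+2*k]?) (List.range (r.length/2)) := by
      apply List.filterMap_congr
      intro k _
      show (x :: y :: r)[1+2*(k+1)]? = r[1+2*k]?
      have : 1+2*(k+1) = 1+2*k + 1 + 1 := by omega
      rw [this]
      simp
    rw [hrest, ih]
    rfl

lemma pvSliceEven {α : Type} (xs : List α) :
    PySem.List.slice? xs (some 0) none 2 = some (pvEvens xs) := by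
  rw [pvSliceEven_formula, pvFilterMap_evens]

lemma pvSliceOdd {α : Type} (xs : List α) :
    PySem.List.slice? xs (some 1) none 2 = some (pvOdds xs) := by
  rw [pvSliceOdd_formula, pvFilterMap_odds]

-- B's body, after the slices are evaluated, equals the two-at-a-time recursion
lemma pvB_eq (items : List String) :
    (((pvEvens items).zip ((((pvOdds items).map PySem.Str.strip)) ++
        List.replicate ((pvEvens items).length - ((pvOdds items).map PySem.Str.strip).length) "Unknown")).map
      (fun p => (PySem.Str.upper (PySem.Str.strip p.1), p.2))) = pvPairs items := by
  induction items using pvPairs.induct with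
  | case1 => simp [pvEvens, pvOdds, pvPairs]
  | case2 x => simp [pvEvens, pvOdds, pvPairs]
  | case3 x y r ih =>
    show ((x :: pvEvens r).zip ((PySem.Str.strip y :: (pvOdds r).map PySem.Str.strip) ++
        List.replicate ((x :: pvEvens r).length - (PySem.Str.strip y :: (pvOdds r).map PySem.Str.strip).length) "Unknown")).map
        (fun p => (PySem.Str.upper (PySem.Str.strip p.1), p.2)) = _
    have hl : (x :: pvEvens r).length - (PySem.Str.strip y :: (pvOdds r).map PySem.Str.strip).length
        = (pvEvens r).length - ((pvOdds r).map PySem.Str.strip).length := by simp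
    rw [hl]
    simp only [List.cons_append, List.zip_cons_cons, List.map_cons]
    rw [ih]
    rfl

-- one step of the range(0, len, 2) loop index list
lemma pvRange_two_step (m : Nat) :
    PySem.List.pyRange 0 ((m:Int)+2) 2 = 0 :: (PySem.List.pyRange 0 (m:Int) 2).map (fun i => i + 2) := by
  rw [PySem.List.pyRange_of_pos _ _ (by norm_num), PySem.List.pyRange_of_pos _ _ (by norm_num)]
  have hc : (if (0:Int) < (m:Int)+2 then (((m:Int)+2 - 0 + 2 - 1) / 2).toNat else 0)
      = (if (0:Int) < (m:Int) then (((m:Int) - 0 + 2 - 1) / 2).toNat else 0) + 1 := by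
    split_ifs <;> omega
  rw [hc, List.range_succ_eq_map, List.map_cons, List.map_map, List.map_map]
  simp only [Function.comp_def]
  refine congrArg₂ _ (by norm_num) (List.map_congr_left fun k _ => ?_)
  push_cast
  ring

-- A's loop body as a function of the index
def pvStep (items : List String) (i : Int) : String × String :=
  (PySem.Str.upper (PySem.Str.strip (PySem.List.pyGetD items i "")),
   if i + 1 < PySem.List.len items
     then PySem.Str.strip (PySem.List.pyGetD items (i + 1) "")
     else "Unknown")

lemma pvGetD_shift2 (l : List String) (a b : String) (n : Nat) :
    PySem.List.pyGetD (a :: b :: l) ((n:Int)+2) "" = PySem.List.pyGetD l (n:Int) "" := by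
  have h : (n:Int)+2 = ((n+2:Nat):Int) := by push_cast; ring
  rw [h, PySem.List.pyGetD_natCast, PySem.List.pyGetD_natCast]
  rw [show n+2 = n+1+1 from rfl]
  simp [List.getD]

lemma pvStep_shift (x y : String) (r : List String) (k : Nat) :
    pvStep (x :: y :: r) ((k:Int) + 2) = pvStep r (k:Int) := by
  unfold pvStep
  have h1 : PySem.List.pyGetD (x :: y :: r) ((k:Int)+2) "" = PySem.List.pyGetD r (k:Int) "" :=
    pvGetD_shift2 r x y k
  have h2 : PySem.List.pyGetD (x :: y :: r) ((k:Int)+2+1) "" = PySem.List.pyGetD r ((k:Int)+1) "" := by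
    have e : (k:Int)+2+1 = ((k+1:Nat):Int)+2 := by push_cast; ring
    have e' : (k:Int)+1 = ((k+1:Nat):Int) := by push_cast; ring
    rw [e, e', pvGetD_shift2 r x y (k+1)]
  rw [h1, h2]
  have hcond : ((k:Int)+2+1 < PySem.List.len (x :: y :: r)) ↔ ((k:Int)+1 < PySem.List.len r) := by
    simp only [PySem.List.len_eq, List.length_cons]
    push_cast
    omega
  exact congrArg _ (if_congr hcond rfl rfl)

lemma pvA_eq (items : List String) :
    (PySem.List.pyRange 0 (PySem.List.len items) 2).map (pvStep items) = pvPairs items := by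
  induction items using pvPairs.induct with
  | case1 => simp [PySem.List.pyRange, pvPairs, PySem.List.len]
  | case2 x =>
    have hl : PySem.List.len [x] = 1 := by simp [PySem.List.len_eq]
    have h1 : PySem.List.pyRange 0 (1:Int) 2 = [0] := by decide
    rw [hl, h1]
    simp only [List.map_cons, List.map_nil]
    unfold pvStep pvPairs
    rw [if_neg (by rw [hl]; omega)]
    rw [PySem.List.pyGetD_zero_cons]
  | case3 x y r ih =>
    have hlen : PySem.List.len (x :: y :: r) = (r.length : Int) + 2 := by
      simp only [PySem.List.len_eq, List.length_cons]
      push_cast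
      ring
    rw [hlen, pvRange_two_step, List.map_cons, List.map_map]
    have h0 : pvStep (x :: y :: r) 0 = (PySem.Str.upper (PySem.Str.strip x), PySem.Str.strip y) := by
      unfold pvStep
      rw [if_pos (by simp only [PySem.List.len_eq, List.length_cons]; push_cast; omega)]
      rw [PySem.List.pyGetD_zero_cons]
      have e : (0:Int)+1 = ((1:Nat):Int) := by norm_num
      rw [e, PySem.List.pyGetD_natCast]
      rfl
    have hcong : (PySem.List.pyRange 0 ((r.length:Int)) 2).map (pvStep (x :: y :: r) ∘ (fun i => i + 2))
        = (PySem.List.pyRange 0 ((r.length:Int)) 2).map (pvStep r) := by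
      apply List.map_congr_left
      intro i hi
      have h0i : 0 ≤ i := ((PySem.List.mem_pyRange_iff_of_pos (by norm_num) i).mp hi).1
      obtain ⟨k, rfl⟩ : ∃ k : Nat, i = (k:Int) := ⟨i.toNat, by omega⟩
      exact pvStep_shift x y r k
    rw [hcong]
    have ih' := ih
    rw [PySem.List.len_eq] at ih'
    rw [h0, ih']
    rfl

-- ===== VERDICT (by name: the statement is the Claim_ definition above) =====
theorem parse_route_input_spec : Claim_equal_parse_route_input := by
  intro s _
  show parse_route_input s = parse_route_input_alt s
  show (PySem.List.pyRange 0 (PySem.List.len ((PySem.Str.split? s ",").getD [])) 2).foldl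
      (fun route i => route ++ [pvStep ((PySem.Str.split? s ",").getD []) i]) []
    = ((((PySem.List.slice? ((PySem.Str.split? s ",").getD []) (some 0) none 2).getD []).zip
        (((((PySem.List.slice? ((PySem.Str.split? s ",").getD []) (some 1) none 2).getD []).map PySem.Str.strip)) ++
          List.replicate (((PySem.List.slice? ((PySem.Str.split? s ",").getD []) (some 0) none 2).getD []).length -
            (((PySem.List.slice? ((PySem.Str.split? s ",").getD []) (some 1) none 2).getD []).map PySem.Str.strip).length) "Unknown")).map
        (fun p => (PySem.Str.upper (PySem.Str.strip p.1), p.2)))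
  generalize (PySem.Str.split? s ",").getD [] = items
  rw [PySem.List.foldl_append_singleton_eq_map (pvStep items), List.nil_append]
  rw [pvSliceEven, pvSliceOdd]
  simp only [Option.getD_some]
  rw [pvA_eq, pvB_eq items]
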